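-- pv_equiv track=rewrite | github.com/marioluk/KLMNR_Phoenix_Quantum_MonoFX | legacy_system/backtest_legacy/production_converter.py | select_best_config
-- ===== SOURCE A (Python) =====
-- from typing import List, Dict, Optional
--
-- def select_best_config(production_ready_files: List[str]) -> Optional[str]:
--     """
--     Seleziona il miglior file di configurazione basato su criteri prestazionali
--
--     Args:
--         production_ready_files: Lista dei file production-ready
--
--     Returns:
--         Path del miglior file o None se nessuno trovato
--     """
--
--     if not production_ready_files:
--         return None
--
--     # Ordine di preferenza: conservative > moderate > aggressive
--     strategy_priority = ["conservative", "moderate", "aggressive"]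
--
--     for strategy in strategy_priority:
--         for file_path in production_ready_files:
--             if f"_{strategy}_production_ready.json" in file_path:
--                 return file_path
--
--     # Se non trova nessuna strategia specifica, prende il primo disponibile
--     return production_ready_files[0]
-- ===== SOURCE B (Python) =====
-- def select_best_config(production_ready_files):
--     """Single pass: track the file with the smallest strategy rank (first file wins ties)."""
--     if not production_ready_files:
--         return None
--     patterns = [f"_{s}_production_ready.json"
--                 for s in ("conservative", "moderate", "aggressive")]
--     best_file = None
--     best_rank = len(patterns)
--     for f in production_ready_files:
--         rank = next((i for i, p in enumerate(patterns) if p in f), len(patterns))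
--         if rank < best_rank:
--             best_file, best_rank = f, rank
--     return best_file if best_file is not None else production_ready_files[0]
-- ===== Notes on version B (the rewrite author's own statement) =====
-- stated objective: alternative
-- what changed: Replaces the strategy-outer/files-inner double loop (up to 3 scans of the list) with a single pass over the files that computes each file's strategy rank and keeps the lowest-ranked, earliest file.
import Mathlib
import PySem

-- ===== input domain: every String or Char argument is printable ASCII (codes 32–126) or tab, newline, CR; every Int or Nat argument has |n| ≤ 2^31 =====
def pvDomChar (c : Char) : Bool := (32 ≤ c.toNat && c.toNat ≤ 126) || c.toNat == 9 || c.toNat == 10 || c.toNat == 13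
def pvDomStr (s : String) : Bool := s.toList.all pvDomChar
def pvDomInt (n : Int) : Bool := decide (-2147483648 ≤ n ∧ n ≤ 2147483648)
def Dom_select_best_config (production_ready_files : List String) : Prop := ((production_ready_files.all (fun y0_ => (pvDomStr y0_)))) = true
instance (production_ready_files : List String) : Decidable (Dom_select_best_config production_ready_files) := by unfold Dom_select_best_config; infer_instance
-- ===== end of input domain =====

-- B replaces A's strategy-outer/files-inner double scan by one pass over the files
-- keeping the lowest-ranked (earliest on ties) file; objective: alternative.

-- ===== PORT A =====
-- inner 'for file_path in production_ready_files' loop of A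
def pvFindFile (strategy : String) : List String → Option String
  | [] => none
  | f :: rest =>
      if PySem.Str.isIn ("_" ++ strategy ++ "_production_ready.json") f then some f
      else pvFindFile strategy rest

-- outer 'for strategy in strategy_priority' loop of A
def pvOuterLoop (strategies files : List String) : Option String :=
  match strategies with
  | [] => none
  | s :: rest =>
      match pvFindFile s files with
      | some f => some f
      | none => pvOuterLoop rest files

def select_best_config (production_ready_files : List String) : Option String :=
  if production_ready_files = [] then none
  else
    let strategy_priority := ["conservative", "moderate", "aggressive"]
    match pvOuterLoop strategy_priority production_ready_files with
    | some f => some f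
    | none => PySem.List.pyGet? production_ready_files 0

-- ===== PORT B =====
-- next((i for i, p in enumerate(patterns) if p in f), dflt)
def pvRankOf (pats : List (Int × String)) (f : String) (dflt : Int) : Int :=
  match pats with
  | [] => dflt
  | (i, p) :: rest => if PySem.Str.isIn p f then i else pvRankOf rest f dflt

def select_best_config_alt (production_ready_files : List String) : Option String :=
  if production_ready_files = [] then none
  else
    let patterns := (["conservative", "moderate", "aggressive"]).map
      (fun s => "_" ++ s ++ "_production_ready.json")
    let st := production_ready_files.foldl
      (fun (s : Option String × Int) f =>
        let rank := pvRankOf (PySem.List.enumerate patterns) f (patterns.length : Int)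
        if rank < s.2 then (some f, rank) else s)
      (none, (patterns.length : Int))
    match st.1 with
    | some f => some f
    | none => PySem.List.pyGet? production_ready_files 0

-- ===== PRECONDITION & SPEC =====
def Spec_select_best_config (production_ready_files : List String) (out : Option String) : Prop := out = select_best_config_alt production_ready_files
instance (production_ready_files : List String) (out : Option String) : Decidable (Spec_select_best_config production_ready_files out) := by unfold Spec_select_best_config; infer_instance

-- ===== CLAIM (what is proved, stated in full; the proofs are below) =====
def Claim_equal_select_best_config : Prop := ∀ (production_ready_files : List String), Dom_select_best_config production_ready_files → Spec_select_best_config production_ready_files (select_best_config production_ready_files)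

-- ===== LEMMAS AND PROOFS =====

def pvP0 : String := "_" ++ "conservative" ++ "_production_ready.json"
def pvP1 : String := "_" ++ "moderate" ++ "_production_ready.json"
def pvP2 : String := "_" ++ "aggressive" ++ "_production_ready.json"

-- the rank B assigns to a file
def pvRk (f : String) : Int :=
  if PySem.Str.isIn pvP0 f then 0
  else if PySem.Str.isIn pvP1 f then 1
  else if PySem.Str.isIn pvP2 f then 2
  else 3

theorem pvRk_bounds (f : String) : 0 ≤ pvRk f ∧ pvRk f ≤ 3 := by
  unfold pvRk; split_ifs <;> omega

theorem pvFindFile_eq_find? (s : String) (l : List String) :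
    pvFindFile s l = l.find? (fun f => PySem.Str.isIn ("_" ++ s ++ "_production_ready.json") f) := by
  induction l with
  | nil => rfl
  | cons f rest ih =>
      rw [pvFindFile]
      by_cases h : PySem.Str.isIn ("_" ++ s ++ "_production_ready.json") f = true
      · rw [if_pos h, List.find?_cons_of_pos h]
      · rw [if_neg h, List.find?_cons_of_neg (by simpa using h), ih]

theorem pvFind?_congr_mem {α : Type} (p q : α → Bool) (l : List α)
    (h : ∀ x ∈ l, p x = q x) : l.find? p = l.find? q := by
  induction l with
  | nil => rfl
  | cons x rest ih =>
      have hx := h x (by simp)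
      simp only [List.find?, hx]
      cases q x <;> simp [ih (fun y hy => h y (by simp [hy]))]

def pvMin (b : Int) (l : List String) : Int := l.foldl (fun m f => min m (pvRk f)) b

theorem pvMin_le (l : List String) : ∀ b : Int, pvMin b l ≤ b := by
  induction l with
  | nil => intro b; simp [pvMin]
  | cons f rest ih =>
      intro b
      have := ih (min b (pvRk f))
      simp only [pvMin, List.foldl] at *
      omega

theorem pvMin_le_mem (l : List String) : ∀ b : Int, ∀ f ∈ l, pvMin b l ≤ pvRk f := by
  induction l with
  | nil => simp
  | cons g rest ih =>
      intro b f hf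
      rcases List.mem_cons.mp hf with h | h
      · subst h
        have := pvMin_le rest (min b (pvRk f))
        simp only [pvMin, List.foldl] at *
        omega
      · exact ih (min b (pvRk g)) f h

theorem pvLe_min (l : List String) : ∀ b c : Int, c ≤ b → (∀ f ∈ l, c ≤ pvRk f) → c ≤ pvMin b l := by
  induction l with
  | nil => intro b c h _; simpa [pvMin] using h
  | cons g rest ih =>
      intro b c hcb h
      have hg := h g (by simp)
      exact ih (min b (pvRk g)) c (by omega) (fun f hf => h f (by simp [hf]))

def pvStep (s : Option String × Int) (f : String) : Option String × Int :=
  if pvRk f < s.2 then (some f, pvRk f) else s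

theorem pvLoopSpec (l : List String) : ∀ (bf : Option String) (br : Int),
    l.foldl pvStep (bf, br) =
      (if pvMin br l < br then (l.find? (fun f => pvRk f == pvMin br l), pvMin br l)
       else (bf, br)) := by
  induction l with
  | nil => intro bf br; simp [pvMin]
  | cons f rest ih =>
      intro bf br
      have hMle : pvMin (min br (pvRk f)) rest ≤ min br (pvRk f) := pvMin_le rest _
      have hMcons : pvMin br (f :: rest) = pvMin (min br (pvRk f)) rest := by
        simp [pvMin, List.foldl]
      by_cases hf : pvRk f < br
      · have hstep : pvStep (bf, br) f = (some f, pvRk f) := by simp [pvStep, hf]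
        have hmin : min br (pvRk f) = pvRk f := by omega
        rw [List.foldl_cons, hstep, ih, hMcons, hmin]
        by_cases h2 : pvMin (pvRk f) rest < pvRk f
        · have hne : (pvRk f == pvMin (pvRk f) rest) = false := by
            simp only [beq_eq_false_iff_ne]; rw [hmin] at hMle; omega
          rw [if_pos h2, if_pos (show pvMin (pvRk f) rest < br by omega),
            List.find?_cons_of_neg (by simp [hne])]
        · have heq : pvMin (pvRk f) rest = pvRk f := by rw [hmin] at hMle; omega
          rw [if_neg h2, heq, if_pos hf, List.find?_cons_of_pos (by simp)]
      · have hstep : pvStep (bf, br) f = (bf, br) := by simp [pvStep, hf]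
        have hmin : min br (pvRk f) = br := by omega
        rw [List.foldl_cons, hstep, ih, hMcons, hmin]
        by_cases h2 : pvMin br rest < br
        · have hne : (pvRk f == pvMin br rest) = false := by
            simp only [beq_eq_false_iff_ne]; omega
          rw [if_pos h2, if_pos h2, List.find?_cons_of_neg (by simp [hne])]
        · rw [if_neg h2, if_neg h2]

-- rank/pattern correspondences
theorem pvRk_eq_zero_iff (f : String) : (pvRk f == 0) = PySem.Str.isIn pvP0 f := by
  unfold pvRk
  cases h0 : PySem.Str.isIn pvP0 f <;> split_ifs <;> simp_all

theorem pvRk_eq_one_iff (f : String) (h0 : PySem.Str.isIn pvP0 f = false) :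
    (pvRk f == 1) = PySem.Str.isIn pvP1 f := by
  unfold pvRk; rw [h0]
  cases h1 : PySem.Str.isIn pvP1 f <;> cases h2 : PySem.Str.isIn pvP2 f <;> simp

theorem pvRk_eq_two_iff (f : String) (h0 : PySem.Str.isIn pvP0 f = false)
    (h1 : PySem.Str.isIn pvP1 f = false) :
    (pvRk f == 2) = PySem.Str.isIn pvP2 f := by
  unfold pvRk; rw [h0, h1]
  cases h2 : PySem.Str.isIn pvP2 f <;> simp

theorem pvRk_pos (f : String) (h0 : PySem.Str.isIn pvP0 f = false) : 1 ≤ pvRk f := by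
  unfold pvRk; rw [h0]; split_ifs <;> simp_all

theorem pvRk_ge_two (f : String) (h0 : PySem.Str.isIn pvP0 f = false)
    (h1 : PySem.Str.isIn pvP1 f = false) : 2 ≤ pvRk f := by
  unfold pvRk; rw [h0, h1]; split_ifs <;> simp_all

theorem pvRk_eq_three (f : String) (h0 : PySem.Str.isIn pvP0 f = false)
    (h1 : PySem.Str.isIn pvP1 f = false) (h2 : PySem.Str.isIn pvP2 f = false) :
    pvRk f = 3 := by
  unfold pvRk; rw [h0, h1, h2]; rfl

-- B's foldl is the pvStep foldl
theorem pvAltFold (l : List String) (s : Option String × Int) :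
    l.foldl (fun (s : Option String × Int) f =>
        let rank := pvRankOf (PySem.List.enumerate ((["conservative", "moderate", "aggressive"]).map
          (fun s => "_" ++ s ++ "_production_ready.json"))) f
          (((["conservative", "moderate", "aggressive"]).map
            (fun s => "_" ++ s ++ "_production_ready.json")).length : Int)
        if rank < s.2 then (some f, rank) else s) s = l.foldl pvStep s := by
  induction l generalizing s with
  | nil => rfl
  | cons f rest ih =>
      rw [List.foldl_cons, List.foldl_cons, ih]
      congr 1

-- ===== VERDICT (by name: the statement is the Claim_ definition above) =====
theorem select_best_config_spec : Claim_equal_select_best_config := by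
  intro files _dom
  unfold Spec_select_best_config select_best_config select_best_config_alt
  by_cases hnil : files = []
  · simp [hnil]
  · simp only [if_neg hnil]
    rw [pvAltFold, pvLoopSpec]
    simp only [pvOuterLoop, pvFindFile_eq_find?]
    have e0 : (fun f => PySem.Str.isIn ("_" ++ "conservative" ++ "_production_ready.json") f)
        = (fun f => PySem.Str.isIn pvP0 f) := rfl
    have e1 : (fun f => PySem.Str.isIn ("_" ++ "moderate" ++ "_production_ready.json") f)
        = (fun f => PySem.Str.isIn pvP1 f) := rfl
    have e2 : (fun f => PySem.Str.isIn ("_" ++ "aggressive" ++ "_production_ready.json") f)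
        = (fun f => PySem.Str.isIn pvP2 f) := rfl
    rw [e0, e1, e2]
    rcases h0 : files.find? (fun f => PySem.Str.isIn pvP0 f) with _ | f0
    · -- no file matches the conservative pattern
      have hall0 : ∀ f ∈ files, PySem.Str.isIn pvP0 f = false := by
        intro f hf
        have := List.find?_eq_none.mp h0 f hf
        simpa using this
      rcases h1 : files.find? (fun f => PySem.Str.isIn pvP1 f) with _ | f1
      · have hall1 : ∀ f ∈ files, PySem.Str.isIn pvP1 f = false := by
          intro f hf
          have := List.find?_eq_none.mp h1 f hf
          simpa using this
        rcases h2 : files.find? (fun f => PySem.Str.isIn pvP2 f) with _ | f2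
        · -- nothing matches: both fall back to the first file
          have hall2 : ∀ f ∈ files, PySem.Str.isIn pvP2 f = false := by
            intro f hf
            have := List.find?_eq_none.mp h2 f hf
            simpa using this
          have hM3 : pvMin 3 files = 3 := by
            have ha := pvMin_le files 3
            have hb := pvLe_min files 3 3 (by omega)
              (fun f hf => by rw [pvRk_eq_three f (hall0 f hf) (hall1 f hf) (hall2 f hf)])
            omega
          simp [hM3]
        · -- first aggressive match wins
          have hmem := List.mem_of_find?_eq_some h2
          have hp2 := List.find?_some h2
          have hM2 : pvMin 3 files = 2 := by
            have hr2 : pvRk f2 = 2 := by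
              unfold pvRk; rw [hall0 f2 hmem, hall1 f2 hmem, hp2]; rfl
            have ha := pvMin_le_mem files 3 f2 hmem
            have hb := pvLe_min files 3 2 (by omega)
              (fun f hf => pvRk_ge_two f (hall0 f hf) (hall1 f hf))
            omega
          have hfind : files.find? (fun f => pvRk f == pvMin 3 files)
              = files.find? (fun f => PySem.Str.isIn pvP2 f) := by
            rw [hM2]
            exact pvFind?_congr_mem _ _ _
              (fun f hf => pvRk_eq_two_iff f (hall0 f hf) (hall1 f hf))
          rw [hM2] at hfind
          simp only [PySem.Str.isIn_eq] at h2
          simp [hM2, hfind, h2]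
      · -- first moderate match wins
        have hmem := List.mem_of_find?_eq_some h1
        have hp1 := List.find?_some h1
        have hM1 : pvMin 3 files = 1 := by
          have hr1 : pvRk f1 = 1 := by
            unfold pvRk; rw [hall0 f1 hmem, hp1]; rfl
          have ha := pvMin_le_mem files 3 f1 hmem
          have hb := pvLe_min files 3 1 (by omega) (fun f hf => pvRk_pos f (hall0 f hf))
          omega
        have hfind : files.find? (fun f => pvRk f == pvMin 3 files)
            = files.find? (fun f => PySem.Str.isIn pvP1 f) := by
          rw [hM1]; exact pvFind?_congr_mem _ _ _ (fun f hf => pvRk_eq_one_iff f (hall0 f hf))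
        rw [hM1] at hfind
        simp only [PySem.Str.isIn_eq] at h1
        simp [hM1, hfind, h1]
    · -- first conservative match wins
      have hmem := List.mem_of_find?_eq_some h0
      have hp0 := List.find?_some h0
      have hM0 : pvMin 3 files = 0 := by
        have hr0 : pvRk f0 = 0 := by unfold pvRk; rw [hp0]; rfl
        have h1 := pvMin_le_mem files 3 f0 hmem
        have h2 := pvLe_min files 3 0 (by omega) (fun f _ => (pvRk_bounds f).1)
        omega
      have hfind : files.find? (fun f => pvRk f == pvMin 3 files)
          = files.find? (fun f => PySem.Str.isIn pvP0 f) := by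
        rw [hM0]; exact pvFind?_congr_mem _ _ _ (fun f _ => pvRk_eq_zero_iff f)
      rw [hM0] at hfind
      simp only [PySem.Str.isIn_eq] at h0
      simp [hM0, hfind, h0]
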